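-- pv_equiv track=rewrite | github.com/kenneththomas/easycore | routes/video_routes.py | slugify_author
-- ===== SOURCE A (Python) =====
-- import unicodedata
--
-- def slugify_author(author_name: str) -> str:
--     """Create a URL-safe slug from an author name.
--     - Lowercase
--     - Normalize accents
--     - Replace non-alphanumeric with single hyphens
--     - Trim hyphens
--     """
--     if not author_name:
--         return ""
--     normalized = unicodedata.normalize('NFKD', author_name)
--     ascii_only = ''.join(ch for ch in normalized if not unicodedata.combining(ch))
--     lowered = ascii_only.lower()
--     slug_chars = []
--     prev_dash = False
--     for ch in lowered:
--         if ch.isalnum():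
--             slug_chars.append(ch)
--             prev_dash = False
--         else:
--             if not prev_dash:
--                 slug_chars.append('-')
--                 prev_dash = True
--     slug = ''.join(slug_chars).strip('-')
--     return slug
-- ===== SOURCE B (Python) =====
-- import unicodedata
--
-- def slugify_author(author_name: str) -> str:
--     """Create a URL-safe slug from an author name (run-grouping re-implementation)."""
--     if not author_name:
--         return ""
--     normalized = unicodedata.normalize('NFKD', author_name)
--     lowered = ''.join(ch for ch in normalized if not unicodedata.combining(ch)).lower()
--     parts = []
--     i, n = 0, len(lowered)
--     while i < n:
--         k = lowered[i].isalnum()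
--         j = i
--         while j < n and lowered[j].isalnum() == k:
--             j += 1
--         parts.append(lowered[i:j] if k else '-')
--         i = j
--     return ''.join(parts).strip('-')
-- ===== Notes on version B (the rewrite author's own statement) =====
-- stated objective: alternative
-- what changed: Replaces the per-character prev_dash flag state machine with a two-pointer run-grouping scan: maximal runs of same isalnum class are located and each run is emitted whole (the run itself, or a single hyphen).
import Mathlib
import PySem

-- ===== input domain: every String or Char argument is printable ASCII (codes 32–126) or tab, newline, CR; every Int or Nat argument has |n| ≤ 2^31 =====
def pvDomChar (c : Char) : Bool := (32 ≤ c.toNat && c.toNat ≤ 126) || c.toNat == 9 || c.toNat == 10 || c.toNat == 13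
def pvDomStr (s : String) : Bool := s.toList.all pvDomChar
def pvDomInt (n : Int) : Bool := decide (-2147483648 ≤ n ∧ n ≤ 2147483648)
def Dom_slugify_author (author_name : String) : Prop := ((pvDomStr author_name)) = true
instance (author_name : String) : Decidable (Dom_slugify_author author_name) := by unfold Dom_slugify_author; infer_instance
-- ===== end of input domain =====

-- B replaces A's prev_dash flag state machine with a two-pointer run-grouping scan (alternative, same cost).

-- ===== PORT A =====
-- NFKD normalization and the combining-character filter are the identity on the ASCII
-- domain Dom_slugify_author (no ASCII character is combining and NFKD fixes ASCII), so
-- both ports transcribe those two lines as the identity; this is exact on Dom.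
def slugify_author (author_name : String) : String :=
  if author_name = "" then ""
  else
    let lowered := PySem.Chars.lower author_name.toList
    let st := lowered.foldl
      (fun (st : List Char × Bool) ch =>
        if PySem.Chars.isalnum ch then (st.1 ++ [ch], false)
        else if st.2 then st else (st.1 ++ ['-'], true))
      ([], false)
    String.ofList (PySem.Chars.stripChars st.1 ['-'])

-- ===== PORT B =====
-- run-grouping: take the maximal run of the head's isalnum class, emit it (or '-'), recurse
def pvGroupRuns : List Char → List Char
  | [] => []
  | c :: cs =>
    let k := PySem.Chars.isalnum c
    let run := cs.takeWhile (fun d => PySem.Chars.isalnum d == k)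
    let rest := cs.dropWhile (fun d => PySem.Chars.isalnum d == k)
    (if k then c :: run else ['-']) ++ pvGroupRuns rest
  termination_by cs => cs.length
  decreasing_by
    exact Nat.lt_succ_of_le (List.length_dropWhile_le _ _)

def slugify_author_alt (author_name : String) : String :=
  if author_name = "" then ""
  else
    let lowered := PySem.Chars.lower author_name.toList
    String.ofList (PySem.Chars.stripChars (pvGroupRuns lowered) ['-'])

-- ===== PRECONDITION & SPEC =====
def Spec_slugify_author (author_name : String) (out : String) : Prop := out = slugify_author_alt author_name
instance (author_name : String) (out : String) : Decidable (Spec_slugify_author author_name out) := by unfold Spec_slugify_author; infer_instance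

-- ===== CLAIM (what is proved, stated in full; the proofs are below) =====
def Claim_equal_slugify_author : Prop := ∀ (author_name : String), Dom_slugify_author author_name → Spec_slugify_author author_name (slugify_author author_name)

-- ===== LEMMAS AND PROOFS =====

-- A's loop as a pure recursion (proof-side characterisation of the fold)
def pvLoopA : Bool → List Char → List Char
  | _, [] => []
  | p, c :: cs =>
    if PySem.Chars.isalnum c then c :: pvLoopA false cs
    else if p then pvLoopA p cs else '-' :: pvLoopA true cs

theorem pvFold_eq_loopA (cs : List Char) (acc : List Char) (p : Bool) :
    (cs.foldl
      (fun (st : List Char × Bool) ch =>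
        if PySem.Chars.isalnum ch then (st.1 ++ [ch], false)
        else if st.2 then st else (st.1 ++ ['-'], true))
      (acc, p)).1 = acc ++ pvLoopA p cs := by
  induction cs generalizing acc p with
  | nil => simp [pvLoopA]
  | cons c cs ih =>
    by_cases h : PySem.Chars.isalnum c = true
    · simp [pvLoopA, h, ih]
    · by_cases hp : p = true
      · simp [pvLoopA, h, hp, ih]
      · simp at hp
        simp [pvLoopA, h, hp, ih]

theorem pvLoopA_false_run (cs : List Char) :
    pvLoopA false cs =
      cs.takeWhile PySem.Chars.isalnum ++ pvLoopA false (cs.dropWhile PySem.Chars.isalnum) := by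
  induction cs with
  | nil => simp
  | cons c cs ih =>
    by_cases h : PySem.Chars.isalnum c = true
    · simp [pvLoopA, h, ih]
    · simp [pvLoopA, h]

theorem pvLoopA_true_skip (cs : List Char) :
    pvLoopA true cs = pvLoopA false (cs.dropWhile (fun d => !PySem.Chars.isalnum d)) := by
  induction cs with
  | nil => simp [pvLoopA]
  | cons c cs ih =>
    by_cases h : PySem.Chars.isalnum c = true
    · simp [pvLoopA, h]
    · simp [pvLoopA, h, ih]

theorem pvLoopA_eq_groupRuns (cs : List Char) : pvLoopA false cs = pvGroupRuns cs := by
  have H : ∀ n (cs : List Char), cs.length ≤ n → pvLoopA false cs = pvGroupRuns cs := by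
    intro n
    induction n with
    | zero =>
      intro cs h
      have : cs = [] := List.length_eq_zero_iff.mp (Nat.le_zero.mp h)
      simp [this, pvLoopA, pvGroupRuns]
    | succ n ih =>
      intro cs h
      match cs with
      | [] => simp [pvLoopA, pvGroupRuns]
      | c :: cs =>
        by_cases hc : PySem.Chars.isalnum c = true
        · have hrest : (cs.dropWhile PySem.Chars.isalnum).length ≤ n := by
            have := List.length_dropWhile_le PySem.Chars.isalnum cs
            simp at h; omega
          simp only [pvGroupRuns, hc]
          have hpred : (fun d => PySem.Chars.isalnum d == true)
              = PySem.Chars.isalnum := by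
            funext d; simp
          rw [hpred]
          simp only [pvLoopA, hc]
          rw [pvLoopA_false_run cs, ih _ hrest]
          simp
        · have hrest : (cs.dropWhile (fun d => !PySem.Chars.isalnum d)).length ≤ n := by
            have := List.length_dropWhile_le (fun d => !PySem.Chars.isalnum d) cs
            simp at h; omega
          simp only [pvGroupRuns, hc]
          have hpred : (fun d => PySem.Chars.isalnum d == false)
              = (fun d => !PySem.Chars.isalnum d) := by
            funext d; simp
          rw [hpred]
          simp only [pvLoopA, hc]
          rw [pvLoopA_true_skip cs, ih _ hrest]
          simp
  exact H cs.length cs le_rfl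

-- ===== VERDICT (by name: the statement is the Claim_ definition above) =====
theorem slugify_author_spec : Claim_equal_slugify_author := by
  intro s _
  unfold Spec_slugify_author slugify_author slugify_author_alt
  by_cases h : s = ""
  · simp [h]
  · simp only [h]
    rw [pvFold_eq_loopA, pvLoopA_eq_groupRuns]
    simp
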